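-- pv_equiv track=rewrite | github.com/whereisalidev/TAFE-NSW-Consultation-Backend-Agents | agent/task_manager.py | _determine_conversation_stage
-- ===== SOURCE A (Python) =====
-- def _determine_conversation_stage(user_message: str) -> str:
--     """Determine the current stage of the consultation based on the user message."""
--
--     message_lower = user_message.lower()
--
--     if any(keyword in message_lower for keyword in ["hello", "hi", "start", "begin", "consultation"]):
--         return "INTRODUCTION"
--     elif any(keyword in message_lower for keyword in ["department", "team", "organization", "challenges"]):
--         return "DISCOVERY"
--     elif any(keyword in message_lower for keyword in ["initiative", "project", "priority", "goal"]):
--         return "EXPLORATION"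
--     elif any(keyword in message_lower for keyword in ["score", "rate", "important", "urgent", "rank"]):
--         return "PRIORITIZATION"
--     elif any(keyword in message_lower for keyword in ["analyze", "analysis", "summary", "results"]):
--         return "ANALYSIS"
--     elif any(keyword in message_lower for keyword in ["action", "plan", "next steps", "implementation"]):
--         return "ACTION_PLANNING"
--     else:
--         return "GENERAL_INQUIRY"
-- ===== SOURCE B (Python) =====
-- _STAGE_NAMES = [
--     "INTRODUCTION", "DISCOVERY", "EXPLORATION",
--     "PRIORITIZATION", "ANALYSIS", "ACTION_PLANNING", "GENERAL_INQUIRY",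
-- ]
--
-- # Inverted index: each keyword mapped to the rank (priority) of its stage.
-- _KEYWORD_RANK = {
--     "hello": 0, "hi": 0, "start": 0, "begin": 0, "consultation": 0,
--     "department": 1, "team": 1, "organization": 1, "challenges": 1,
--     "initiative": 2, "project": 2, "priority": 2, "goal": 2,
--     "score": 3, "rate": 3, "important": 3, "urgent": 3, "rank": 3,
--     "analyze": 4, "analysis": 4, "summary": 4, "results": 4,
--     "action": 5, "plan": 5, "next steps": 5, "implementation": 5,
-- }
--
-- def _determine_conversation_stage(user_message: str) -> str:
--     """Determine the current stage of the consultation based on the user message."""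
--     message_lower = user_message.lower()
--     best = min(
--         (rank for kw, rank in _KEYWORD_RANK.items() if kw in message_lower),
--         default=len(_STAGE_NAMES) - 1,
--     )
--     return _STAGE_NAMES[best]
-- ===== Notes on version B (the rewrite author's own statement) =====
-- stated objective: alternative
-- what changed: Replaces the ordered if/elif first-matching-group scan by an inverted keyword-to-rank index: take the minimum rank over all keywords occurring in the lowercased message and index into a stage-name table (the first matching branch equals the minimum rank).
import Mathlib
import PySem

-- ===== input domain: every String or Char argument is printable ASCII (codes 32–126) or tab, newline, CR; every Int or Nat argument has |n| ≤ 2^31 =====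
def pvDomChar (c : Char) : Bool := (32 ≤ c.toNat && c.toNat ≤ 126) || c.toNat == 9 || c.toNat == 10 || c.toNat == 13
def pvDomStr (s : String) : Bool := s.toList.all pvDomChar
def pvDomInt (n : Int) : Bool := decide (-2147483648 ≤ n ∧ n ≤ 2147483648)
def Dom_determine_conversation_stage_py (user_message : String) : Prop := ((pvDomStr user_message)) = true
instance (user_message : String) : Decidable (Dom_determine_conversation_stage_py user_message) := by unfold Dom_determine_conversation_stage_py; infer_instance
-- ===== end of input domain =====

-- B replaces the ordered if/elif group scan by an inverted keyword→rank index: the result is the stage of minimum rank among matching keywords.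


-- ===== PORT A =====
def determine_conversation_stage_py (user_message : String) : String :=
  let message_lower := PySem.Str.lower user_message
  if ["hello", "hi", "start", "begin", "consultation"].any (fun keyword => PySem.Str.isIn keyword message_lower) then
    "INTRODUCTION"
  else if ["department", "team", "organization", "challenges"].any (fun keyword => PySem.Str.isIn keyword message_lower) then
    "DISCOVERY"
  else if ["initiative", "project", "priority", "goal"].any (fun keyword => PySem.Str.isIn keyword message_lower) then
    "EXPLORATION"
  else if ["score", "rate", "important", "urgent", "rank"].any (fun keyword => PySem.Str.isIn keyword message_lower) then
    "PRIORITIZATION"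
  else if ["analyze", "analysis", "summary", "results"].any (fun keyword => PySem.Str.isIn keyword message_lower) then
    "ANALYSIS"
  else if ["action", "plan", "next steps", "implementation"].any (fun keyword => PySem.Str.isIn keyword message_lower) then
    "ACTION_PLANNING"
  else
    "GENERAL_INQUIRY"

-- ===== PORT B =====
def stageNames : List String :=
  ["INTRODUCTION", "DISCOVERY", "EXPLORATION",
   "PRIORITIZATION", "ANALYSIS", "ACTION_PLANNING", "GENERAL_INQUIRY"]

-- inverted index: keyword → rank of its stage (insertion order of the Python dict)
def keywordRank : List (String × Nat) :=
  [("hello", 0), ("hi", 0), ("start", 0), ("begin", 0), ("consultation", 0),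
   ("department", 1), ("team", 1), ("organization", 1), ("challenges", 1),
   ("initiative", 2), ("project", 2), ("priority", 2), ("goal", 2),
   ("score", 3), ("rate", 3), ("important", 3), ("urgent", 3), ("rank", 3),
   ("analyze", 4), ("analysis", 4), ("summary", 4), ("results", 4),
   ("action", 5), ("plan", 5), ("next steps", 5), ("implementation", 5)]

def determine_conversation_stage_py_alt (user_message : String) : String :=
  let message_lower := PySem.Str.lower user_message
  -- min over the generator, default = len(_STAGE_NAMES) - 1
  let best := keywordRank.foldl
    (fun acc p => if PySem.Str.isIn p.1 message_lower then min acc p.2 else acc)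
    (stageNames.length - 1)
  stageNames.getD best "GENERAL_INQUIRY"

-- ===== PRECONDITION & SPEC =====
def Spec_determine_conversation_stage_py (user_message : String) (out : String) : Prop := out = determine_conversation_stage_py_alt user_message
instance (user_message : String) (out : String) : Decidable (Spec_determine_conversation_stage_py user_message out) := by unfold Spec_determine_conversation_stage_py; infer_instance

-- ===== CLAIM =====
def Claim_equal_determine_conversation_stage_py : Prop := ∀ (user_message : String), Dom_determine_conversation_stage_py user_message → Spec_determine_conversation_stage_py user_message (determine_conversation_stage_py user_message)

-- ===== LEMMAS AND PROOFS =====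
-- folding one stage's keyword group (all of rank r) into the running minimum
theorem pv_group_fold (m : String) (r : Nat) (ks : List String) (acc : Nat) :
    (ks.map (fun k => (k, r))).foldl
      (fun acc p => if PySem.Str.isIn p.1 m then min acc p.2 else acc) acc
    = if ks.any (fun k => PySem.Str.isIn k m) then min acc r else acc := by
  induction ks generalizing acc with
  | nil => simp
  | cons k ks ih =>
    simp only [List.map_cons, List.foldl_cons, List.any_cons]
    by_cases hb : PySem.Str.isIn k m = true
    · rw [if_pos hb, ih]
      simp only [hb, Bool.true_or, if_true]
      split_ifs <;> omega
    · have hb' : PySem.Str.isIn k m = false := Bool.eq_false_iff.mpr hb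
      rw [if_neg hb, ih]
      simp only [hb', Bool.false_or]

theorem pv_keywordRank_groups :
    keywordRank =
      (["hello", "hi", "start", "begin", "consultation"].map (fun k => (k, 0)))
      ++ (["department", "team", "organization", "challenges"].map (fun k => (k, 1)))
      ++ (["initiative", "project", "priority", "goal"].map (fun k => (k, 2)))
      ++ (["score", "rate", "important", "urgent", "rank"].map (fun k => (k, 3)))
      ++ (["analyze", "analysis", "summary", "results"].map (fun k => (k, 4)))
      ++ (["action", "plan", "next steps", "implementation"].map (fun k => (k, 5))) := by
  rfl

-- ===== VERDICT =====
theorem determine_conversation_stage_py_spec : Claim_equal_determine_conversation_stage_py := by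
  intro user_message _
  unfold Spec_determine_conversation_stage_py determine_conversation_stage_py determine_conversation_stage_py_alt
  rw [pv_keywordRank_groups]
  simp only [List.foldl_append, pv_group_fold, stageNames]
  generalize (["hello", "hi", "start", "begin", "consultation"].any
      (fun k => PySem.Str.isIn k (PySem.Str.lower user_message))) = b1
  generalize (["department", "team", "organization", "challenges"].any
      (fun k => PySem.Str.isIn k (PySem.Str.lower user_message))) = b2
  generalize (["initiative", "project", "priority", "goal"].any
      (fun k => PySem.Str.isIn k (PySem.Str.lower user_message))) = b3
  generalize (["score", "rate", "important", "urgent", "rank"].any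
      (fun k => PySem.Str.isIn k (PySem.Str.lower user_message))) = b4
  generalize (["analyze", "analysis", "summary", "results"].any
      (fun k => PySem.Str.isIn k (PySem.Str.lower user_message))) = b5
  generalize (["action", "plan", "next steps", "implementation"].any
      (fun k => PySem.Str.isIn k (PySem.Str.lower user_message))) = b6
  cases b1 <;> cases b2 <;> cases b3 <;> cases b4 <;> cases b5 <;> cases b6 <;> rfl
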